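-- pv_equiv track=rewrite | github.com/hayama17/infra-jong | backend/game/tiles.py | find_all_valid_terms
-- ===== SOURCE A (Python) =====
-- VALID_TERMS = [
--     "SLI", "SLO", "SLA", "SRE",
--     "RTO", "RPO",
--     "HPA", "VPA", "CPA", "OPA",
--     "OCI", "CNI", "CSI", "CRI",
--     "POD", "IDP", "IAC", "CRD", "PVC", "SVC",
--     "DNS", "TLS", "VPN", "CDN",
--     "PKI", "SSO",
--     "IAM", "K8S", "SDK",
--     "APM",
--     "NOC",
-- ]
--
-- def find_all_valid_terms(tiles: list[str]) -> list[tuple[str, list[int]]]: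
--     """
--     Find all valid terms that can be formed from the given tiles.
--     Returns list of (term_string, [indices_used]) tuples.
--     """
--     results = []
--     n = len(tiles)
--     from itertools import combinations, permutations
--
--     for indices in combinations(range(n), 3):
--         subset = [tiles[i] for i in indices]
--         for perm in permutations(subset):
--             term = "".join(perm)
--             if term in VALID_TERMS:
--                 results.append((term, list(indices)))
--                 break  # one perm per index combo is enough
--     return results
-- ===== SOURCE B (Python) =====
-- VALID_TERMS = [
--     "SLI", "SLO", "SLA", "SRE",
--     "RTO", "RPO",
--     "HPA", "VPA", "CPA", "OPA",
--     "OCI", "CNI", "CSI", "CRI",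
--     "POD", "IDP", "IAC", "CRD", "PVC", "SVC",
--     "DNS", "TLS", "VPN", "CDN",
--     "PKI", "SSO",
--     "IAM", "K8S", "SDK",
--     "APM",
--     "NOC",
-- ]
--
--
-- def _first_term(a, b, c):
--     # The first permutation-concatenation of (a, b, c) that is a valid term,
--     # in the order itertools.permutations would visit them.
--     for s in (a + b + c, a + c + b, b + a + c, b + c + a, c + a + b, c + b + a):
--         if s in VALID_TERMS:
--             return s
--     return None
--
--
-- def _build_table():
--     # Precompute, once, every ordered tile triple that can form a valid term:
--     # split each term into three (possibly empty) parts, take every ordering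
--     # of the parts, and record the winning term for that ordered triple.
--     table = {}
--     for t in VALID_TERMS:
--         m = len(t)
--         for p in range(m + 1):
--             for q in range(p, m + 1):
--                 x, y, z = t[:p], t[p:q], t[q:]
--                 for tr in ((x, y, z), (x, z, y), (y, x, z),
--                            (y, z, x), (z, x, y), (z, y, x)):
--                     table[tr] = _first_term(tr[0], tr[1], tr[2])
--     return table
--
--
-- _TABLE = _build_table()
--
--
-- def find_all_valid_terms(tiles: list[str]) -> list[tuple[str, list[int]]]:
--     """
--     Find all valid terms that can be formed from the given tiles.
--     Returns list of (term_string, [indices_used]) tuples.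
--     """
--     results = []
--     n = len(tiles)
--     for i in range(n):
--         for j in range(i + 1, n):
--             for k in range(j + 1, n):
--                 term = _TABLE.get((tiles[i], tiles[j], tiles[k]))
--                 if term is not None:
--                     results.append((term, [i, j, k]))
--     return results
-- ===== Notes on version B (the rewrite author's own statement) =====
-- stated objective: faster
-- what changed: B precomputes once, from the splits of the 31 valid terms, a constant dictionary mapping each ordered tile triple to its winning term, so the per-combination scan over 6 permutations joined and tested against the term list is replaced by a single O(1) dict lookup.
import Mathlib
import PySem

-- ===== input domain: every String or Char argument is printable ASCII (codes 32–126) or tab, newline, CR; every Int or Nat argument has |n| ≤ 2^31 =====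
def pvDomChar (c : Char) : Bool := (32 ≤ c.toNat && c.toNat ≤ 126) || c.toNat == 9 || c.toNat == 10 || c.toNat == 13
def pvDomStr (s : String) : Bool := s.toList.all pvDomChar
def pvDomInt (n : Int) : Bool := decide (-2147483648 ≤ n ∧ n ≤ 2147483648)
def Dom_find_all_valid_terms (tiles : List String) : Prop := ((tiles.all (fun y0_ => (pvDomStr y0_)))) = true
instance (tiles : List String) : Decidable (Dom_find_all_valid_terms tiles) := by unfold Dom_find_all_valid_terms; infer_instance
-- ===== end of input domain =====

-- B replaces A's per-combination permutation scan over the term list by one lookup in a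
-- constant table precomputed from the splits of the valid terms (measured faster, constant factor).


def pvVALID_TERMS : List String :=
  ["SLI", "SLO", "SLA", "SRE",
   "RTO", "RPO",
   "HPA", "VPA", "CPA", "OPA",
   "OCI", "CNI", "CSI", "CRI",
   "POD", "IDP", "IAC", "CRD", "PVC", "SVC",
   "DNS", "TLS", "VPN", "CDN",
   "PKI", "SSO",
   "IAM", "K8S", "SDK",
   "APM",
   "NOC"]

-- ===== PORT A =====
-- itertools.combinations(range(n), 3) ported by hand (no PySem primitive): the
-- lexicographically ordered triples i < j < k, exactly combinations' order.
def pvCombos3 (n : Int) : List (Int × Int × Int) :=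
  (PySem.List.pyRange 0 n 1).flatMap (fun i =>
    (PySem.List.pyRange (i + 1) n 1).flatMap (fun j =>
      (PySem.List.pyRange (j + 1) n 1).map (fun k => (i, j, k))))

def find_all_valid_terms (tiles : List String) : List (String × List Int) :=
  let n := PySem.List.len tiles
  (pvCombos3 n).foldl (fun results c =>
    let subset := [PySem.List.pyGetD tiles c.1 "", PySem.List.pyGetD tiles c.2.1 "",
                   PySem.List.pyGetD tiles c.2.2 ""]
    -- 'for perm in permutations(subset): … break' = first permutation whose join is a valid term
    match (PySem.List.permutations subset 3).findSome? (fun perm =>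
        let term := PySem.Str.join "" perm
        if pvVALID_TERMS.contains term then some term else none) with
    | some term => results ++ [(term, [c.1, c.2.1, c.2.2])]
    | none => results) []

-- ===== PORT B =====
def pvFirstTerm (a b c : String) : Option String :=
  [PySem.Str.join "" [a, b, c], PySem.Str.join "" [a, c, b], PySem.Str.join "" [b, a, c],
   PySem.Str.join "" [b, c, a], PySem.Str.join "" [c, a, b], PySem.Str.join "" [c, b, a]].find?
    (fun s => pvVALID_TERMS.contains s)

def pvBuildStep (tb : PySem.Dict (String × String × String) (Option String)) (t : String) :
    PySem.Dict (String × String × String) (Option String) :=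
  let m := PySem.Str.len t
  (PySem.List.pyRange 0 (m + 1) 1).foldl (fun tb p =>
    (PySem.List.pyRange p (m + 1) 1).foldl (fun tb q =>
      let x := PySem.Str.slice t none (some p)
      let y := PySem.Str.slice t (some p) (some q)
      let z := PySem.Str.slice t (some q) none
      [(x, y, z), (x, z, y), (y, x, z), (y, z, x), (z, x, y), (z, y, x)].foldl
        (fun tb tr => tb.insert tr (pvFirstTerm tr.1 tr.2.1 tr.2.2)) tb) tb) tb

def pvTable : PySem.Dict (String × String × String) (Option String) :=
  pvVALID_TERMS.foldl pvBuildStep PySem.Dict.empty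

def find_all_valid_terms_alt (tiles : List String) : List (String × List Int) :=
  let n := PySem.List.len tiles
  (PySem.List.pyRange 0 n 1).foldl (fun results i =>
    (PySem.List.pyRange (i + 1) n 1).foldl (fun results j =>
      (PySem.List.pyRange (j + 1) n 1).foldl (fun results k =>
        match pvTable.get? (PySem.List.pyGetD tiles i "", PySem.List.pyGetD tiles j "",
                            PySem.List.pyGetD tiles k "") with
        | some (some term) => results ++ [(term, [i, j, k])]
        | _ => results) results) results) []

-- ===== PRECONDITION & SPEC =====
def Spec_find_all_valid_terms (tiles : List String) (out : List (String × List Int)) : Prop := out = find_all_valid_terms_alt tiles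
instance (tiles : List String) (out : List (String × List Int)) : Decidable (Spec_find_all_valid_terms tiles out) := by unfold Spec_find_all_valid_terms; infer_instance

-- ===== CLAIM (what is proved, stated in full; the proofs are below) =====
def Claim_equal_find_all_valid_terms : Prop := ∀ (tiles : List String), Dom_find_all_valid_terms tiles → Spec_find_all_valid_terms tiles (find_all_valid_terms tiles)

-- ===== LEMMAS AND PROOFS =====
set_option maxRecDepth 8192

-- a foldl preserves a predicate of the accumulator
theorem pv_foldl_pres {ι δ : Type} (P : δ → Prop) (f : δ → ι → δ) (l : List ι)
    (h : ∀ d x, P d → P (f d x)) (d : δ) (h0 : P d) : P (l.foldl f d) := by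
  induction l generalizing d with
  | nil => exact h0
  | cons y l ih => exact ih _ (h d y h0)

-- a foldl of dict updates reaches a key that some element's step establishes
theorem pv_foldl_contains_of_mem {ι : Type}
    (f : PySem.Dict (String × String × String) (Option String) → ι →
         PySem.Dict (String × String × String) (Option String))
    (k : String × String × String)
    (mono : ∀ d x, (d.contains k) = true → ((f d x).contains k) = true)
    (l : List ι) (x : ι) (hx : x ∈ l) (hit : ∀ d, ((f d x).contains k) = true) :
    ∀ d, ((l.foldl f d).contains k) = true := by
  induction l with
  | nil => cases hx
  | cons y l ih =>
      intro d
      rcases List.mem_cons.mp hx with h | h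
      · subst h
        exact pv_foldl_pres (fun d => (d.contains k) = true) f l mono _ (hit d)
      · exact ih h _

-- SOUNDNESS: every value stored in the table is pvFirstTerm of its key
theorem pv_table_sound :
    ∀ k v, pvTable.get? k = some v → v = pvFirstTerm k.1 k.2.1 k.2.2 := by
  have main := pv_foldl_pres
    (P := fun (d : PySem.Dict (String × String × String) (Option String)) =>
      ∀ k v, d.get? k = some v → v = pvFirstTerm k.1 k.2.1 k.2.2)
    (f := pvBuildStep) (l := pvVALID_TERMS) ?_ PySem.Dict.empty ?_
  · exact main
  · intro d t hd
    simp only [pvBuildStep]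
    refine pv_foldl_pres (P := fun (d : PySem.Dict (String × String × String) (Option String)) => ∀ k v, d.get? k = some v → v = pvFirstTerm k.1 k.2.1 k.2.2) _ _ ?_ _ hd
    intro d p hd
    refine pv_foldl_pres (P := fun (d : PySem.Dict (String × String × String) (Option String)) => ∀ k v, d.get? k = some v → v = pvFirstTerm k.1 k.2.1 k.2.2) _ _ ?_ _ hd
    intro d q hd
    refine pv_foldl_pres (P := fun (d : PySem.Dict (String × String × String) (Option String)) => ∀ k v, d.get? k = some v → v = pvFirstTerm k.1 k.2.1 k.2.2) _ _ ?_ _ hd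
    intro d tr hd k v hv
    rw [PySem.Dict.get?_insert] at hv
    split at hv
    · rename_i hk
      subst hk
      exact (Option.some_inj.mp hv).symm
    · exact hd k v hv
  · intro k v h
    simp [PySem.Dict.get?_empty] at h

-- the string whose char list is X ++ Y ++ Z splits back into its parts by slicing
theorem pv_slice_split (t x y z : String)
    (h : t.toList = x.toList ++ y.toList ++ z.toList) :
    PySem.Str.slice t none (some ((x.toList.length : Nat) : Int)) = x ∧
    PySem.Str.slice t (some ((x.toList.length : Nat) : Int))
      (some (((x.toList.length + y.toList.length : Nat)) : Int)) = y ∧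
    PySem.Str.slice t (some (((x.toList.length + y.toList.length : Nat)) : Int)) none = z := by
  refine ⟨?_, ?_, ?_⟩
  · apply String.toList_inj.mp
    simp only [PySem.Str.slice, PySem.Chars.slice, String.toList_ofList,
      PySem.List.slice_to_natCast, h, List.append_assoc, List.take_left]
  · apply String.toList_inj.mp
    simp only [PySem.Str.slice, PySem.Chars.slice, String.toList_ofList,
      PySem.List.slice_natCast, h, Nat.add_sub_cancel_left, List.append_assoc,
      List.drop_left, List.take_left]
  · apply String.toList_inj.mp
    simp only [PySem.Str.slice, PySem.Chars.slice, String.toList_ofList,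
      PySem.List.slice_from_natCast, h]
    rw [show x.toList.length + y.toList.length = (x.toList ++ y.toList).length by simp,
      List.drop_left]

-- processing term t puts every ordering of every split of t into the table
theorem pv_buildStep_hit (t u v w : String) (k : String × String × String)
    (hsplit : t.toList = u.toList ++ v.toList ++ w.toList)
    (hk : k ∈ [(u, v, w), (u, w, v), (v, u, w), (v, w, u), (w, u, v), (w, v, u)]) :
    ∀ tb, ((pvBuildStep tb t).contains k) = true := by
  intro tb
  simp only [pvBuildStep]
  have hlen : u.toList.length + v.toList.length + w.toList.length = t.toList.length := by
    rw [hsplit]; simp; omega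
  have hp : ((u.toList.length : Nat) : Int) ∈
      PySem.List.pyRange 0 (PySem.Str.len t + 1) 1 := by
    rw [PySem.List.mem_pyRange_one, PySem.Str.len_eq]
    constructor
    · positivity
    · omega
  refine pv_foldl_contains_of_mem _ k ?_ _ _ hp ?_ tb
  · intro d p hd
    refine pv_foldl_pres (P := fun (d : PySem.Dict (String × String × String) (Option String)) => d.contains k = true) _ _ ?_ _ hd
    intro d q hd
    refine pv_foldl_pres (P := fun (d : PySem.Dict (String × String × String) (Option String)) => d.contains k = true) _ _ ?_ _ hd
    intro d tr hd
    simp [PySem.Dict.contains_insert, hd]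
  · intro d
    have hq : (((u.toList.length + v.toList.length : Nat)) : Int) ∈
        PySem.List.pyRange ((u.toList.length : Nat) : Int) (PySem.Str.len t + 1) 1 := by
      rw [PySem.List.mem_pyRange_one, PySem.Str.len_eq]
      constructor
      · push_cast; omega
      · push_cast; omega
    refine pv_foldl_contains_of_mem _ k ?_ _ _ hq ?_ d
    · intro d q hd
      refine pv_foldl_pres (P := fun (d : PySem.Dict (String × String × String) (Option String)) => d.contains k = true) _ _ ?_ _ hd
      intro d tr hd
      simp [PySem.Dict.contains_insert, hd]
    · intro d
      obtain ⟨hx, hy, hz⟩ := pv_slice_split t u v w hsplit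
      rw [hx, hy, hz]
      refine pv_foldl_contains_of_mem _ k ?_ _ k hk ?_ d
      · intro d tr hd
        simp [PySem.Dict.contains_insert, hd]
      · intro d
        simp [PySem.Dict.contains_insert_self]

-- the character list of a join of three strings
theorem pv_join3_toList (a b c : String) :
    (PySem.Str.join "" [a, b, c]).toList = a.toList ++ b.toList ++ c.toList := by
  simp [PySem.Str.join, PySem.Chars.join, List.intercalate]

-- COMPLETENESS: whenever pvFirstTerm matches, the key is in the table
theorem pv_table_complete (a b c : String) (t : String)
    (h : pvFirstTerm a b c = some t) : (pvTable.contains (a, b, c)) = true := by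
  have hmem : t ∈ [PySem.Str.join "" [a, b, c], PySem.Str.join "" [a, c, b],
      PySem.Str.join "" [b, a, c], PySem.Str.join "" [b, c, a], PySem.Str.join "" [c, a, b],
      PySem.Str.join "" [c, b, a]] := List.mem_of_find?_eq_some h
  have hterm : t ∈ pvVALID_TERMS := List.contains_iff_mem.mp (List.find?_some h)
  have hit : ∀ tb, ((pvBuildStep tb t).contains (a, b, c)) = true := by
    simp only [List.mem_cons, List.not_mem_nil, or_false] at hmem
    rcases hmem with h1 | h1 | h1 | h1 | h1 | h1 <;>
      [ (refine pv_buildStep_hit t a b c (a, b, c) ?_ (by simp));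
        (refine pv_buildStep_hit t a c b (a, b, c) ?_ (by simp));
        (refine pv_buildStep_hit t b a c (a, b, c) ?_ (by simp));
        (refine pv_buildStep_hit t b c a (a, b, c) ?_ (by simp));
        (refine pv_buildStep_hit t c a b (a, b, c) ?_ (by simp));
        (refine pv_buildStep_hit t c b a (a, b, c) ?_ (by simp))] <;>
      rw [h1, pv_join3_toList]
  exact pv_foldl_contains_of_mem pvBuildStep (a, b, c)
    (fun d x hd => by
      simp only [pvBuildStep]
      refine pv_foldl_pres (P := fun (d : PySem.Dict (String × String × String) (Option String)) => d.contains (a, b, c) = true) _ _ ?_ _ hd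
      intro d p hd
      refine pv_foldl_pres (P := fun (d : PySem.Dict (String × String × String) (Option String)) => d.contains (a, b, c) = true) _ _ ?_ _ hd
      intro d q hd
      refine pv_foldl_pres (P := fun (d : PySem.Dict (String × String × String) (Option String)) => d.contains (a, b, c) = true) _ _ ?_ _ hd
      intro d tr hd
      simp [PySem.Dict.contains_insert, hd])
    pvVALID_TERMS t hterm hit PySem.Dict.empty

-- the table lookup computes exactly pvFirstTerm (as far as port B consumes it)
theorem pv_table_lookup (a b c : String) :
    pvTable.get? (a, b, c) = some (pvFirstTerm a b c) ∨
    (pvTable.get? (a, b, c) = none ∧ pvFirstTerm a b c = none) := by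
  rcases Option.eq_none_or_eq_some (pvTable.get? (a, b, c)) with hg | ⟨v, hg⟩
  · right
    refine ⟨hg, ?_⟩
    cases hft : pvFirstTerm a b c with
    | none => rfl
    | some t =>
        have hc := pv_table_complete a b c t hft
        rw [PySem.Dict.contains_eq_isSome_get?, hg] at hc
        simp at hc
  · left
    rw [pv_table_sound (a, b, c) v hg] at hg
    exact hg

-- A's inner permutation scan computes pvFirstTerm
theorem pv_inner_eq_firstTerm (a b c : String) :
    (PySem.List.permutations [a, b, c] 3).findSome? (fun perm =>
        let term := PySem.Str.join "" perm
        if pvVALID_TERMS.contains term then some term else none) = pvFirstTerm a b c := by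
  have hp : PySem.List.permutations [a, b, c] 3 =
      [[a, b, c], [a, c, b], [b, a, c], [b, c, a], [c, a, b], [c, b, a]] := rfl
  rw [hp]
  simp only [pvFirstTerm, List.findSome?, List.find?]
  cases pvVALID_TERMS.contains (PySem.Str.join "" [a, b, c]) <;>
    cases pvVALID_TERMS.contains (PySem.Str.join "" [a, c, b]) <;>
    cases pvVALID_TERMS.contains (PySem.Str.join "" [b, a, c]) <;>
    cases pvVALID_TERMS.contains (PySem.Str.join "" [b, c, a]) <;>
    cases pvVALID_TERMS.contains (PySem.Str.join "" [c, a, b]) <;>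
    cases pvVALID_TERMS.contains (PySem.Str.join "" [c, b, a]) <;>
    simp_all

-- the two loop bodies agree on every accumulator and index triple
theorem pv_body_eq (tiles : List String) (acc : List (String × List Int)) (i j k : Int) :
    (match (PySem.List.permutations [PySem.List.pyGetD tiles i "",
        PySem.List.pyGetD tiles j "", PySem.List.pyGetD tiles k ""] 3).findSome? (fun perm =>
        let term := PySem.Str.join "" perm
        if pvVALID_TERMS.contains term then some term else none) with
      | some term => acc ++ [(term, [i, j, k])]
      | none => acc) =
    (match pvTable.get? (PySem.List.pyGetD tiles i "", PySem.List.pyGetD tiles j "",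
        PySem.List.pyGetD tiles k "") with
      | some (some term) => acc ++ [(term, [i, j, k])]
      | _ => acc) := by
  rw [pv_inner_eq_firstTerm]
  rcases pv_table_lookup (PySem.List.pyGetD tiles i "") (PySem.List.pyGetD tiles j "")
      (PySem.List.pyGetD tiles k "") with h | ⟨h1, h2⟩
  · rw [h]
    cases pvFirstTerm (PySem.List.pyGetD tiles i "") (PySem.List.pyGetD tiles j "")
        (PySem.List.pyGetD tiles k "") <;> rfl
  · rw [h1, h2]

-- two foldls with pointwise-equal step functions agree
theorem pv_foldl_ext {α β : Type} (f g : β → α → β) (h : ∀ acc x, f acc x = g acc x)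
    (l : List α) (init : β) : l.foldl f init = l.foldl g init := by
  have hfg : f = g := funext fun a => funext fun x => h a x
  rw [hfg]

-- ===== VERDICT (by name: the statement is the Claim_ definition above) =====
theorem find_all_valid_terms_spec : Claim_equal_find_all_valid_terms := by
  intro tiles _
  unfold Spec_find_all_valid_terms
  simp only [find_all_valid_terms, find_all_valid_terms_alt, pvCombos3]
  rw [List.foldl_flatMap]
  refine pv_foldl_ext _ _ ?_ _ _
  intro acc i
  rw [List.foldl_flatMap]
  refine pv_foldl_ext _ _ ?_ _ _
  intro acc j
  rw [List.foldl_map]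
  refine pv_foldl_ext _ _ ?_ _ _
  intro acc k
  exact pv_body_eq tiles acc i j k
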